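-- pv_equiv track=rewrite | github.com/SuchismitaDhal/Solutions-dailyInterviewPro | 2019/12-December/12.24.py | swap_bits
-- ===== SOURCE A (Python) =====
-- swap = [0, 2, 1, 3]
--
-- def swap_bits(num):
--     # Time: O(logn)  Space: O(1)
--     sol = 0
--     p = 1
--     while num:
--         r = num % 4
--         num = num // 4
--         sol = swap[r] * p + sol
--         p = p << 2
--     return sol
-- ===== SOURCE B (Python) =====
-- def swap_bits(num):
--     # Swap every adjacent bit pair in one bitwise transform (classic mask trick).
--     # The fixed mask covers bit positions 0..63, wide enough for the 32-bit input range.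
--     MASK = 0x5555555555555555  # bits at even positions 0,2,...,62
--     return ((num >> 1) & MASK) | ((num & MASK) << 1)
-- ===== Notes on version B (the rewrite author's own statement) =====
-- stated objective: idiomatic
-- what changed: Replaces the base-4 digit loop with a lookup table by the single branch-free bitwise transform ((num>>1)&M)|((num&M)<<1) using the classic alternating-bit mask.
import Mathlib
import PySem

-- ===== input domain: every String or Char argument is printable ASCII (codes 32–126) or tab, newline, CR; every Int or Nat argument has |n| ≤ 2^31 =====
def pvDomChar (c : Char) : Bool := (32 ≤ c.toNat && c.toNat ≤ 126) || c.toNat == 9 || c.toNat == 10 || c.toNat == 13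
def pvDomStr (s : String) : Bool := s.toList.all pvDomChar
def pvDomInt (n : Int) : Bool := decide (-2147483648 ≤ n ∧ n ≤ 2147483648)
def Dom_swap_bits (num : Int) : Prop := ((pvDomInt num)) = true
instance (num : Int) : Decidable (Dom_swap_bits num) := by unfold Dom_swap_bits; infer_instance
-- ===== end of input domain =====

-- B replaces A's base-4 digit loop with the single branch-free mask transform ((num>>1)&M)|((num&M)<<1) (idiomatic bit trick).

-- ===== PORT A =====
def pvSwapTable : List Int := [0, 2, 1, 3]

-- Python's 'while num:' loop; for num < 0 Python never terminates (num//4 stabilises at -1),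
-- so the guard 'num ≤ 0' only totalises the function outside Pre_swap_bits.
def pvSwapLoop (num sol p : Int) : Int :=
  if num ≤ 0 then sol
  else
    pvSwapLoop (PySem.Int.floordiv num 4)
      ((PySem.List.pyGet? pvSwapTable (PySem.Int.mod num 4)).getD 0 * p + sol) (p <<< (2 : Nat))
termination_by num.toNat
decreasing_by
  have h4 : PySem.Int.floordiv num 4 = ((num.toNat / 4 : Nat) : Int) := by
    have : num = ((num.toNat : Nat) : Int) := by omega
    rw [this]
    exact_mod_cast PySem.Int.floordiv_natCast num.toNat 4
  rw [h4]
  simp only [Int.toNat_natCast]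
  omega

def swap_bits (num : Int) : Int := pvSwapLoop num 0 1

-- ===== PORT B =====
def swap_bits_alt (num : Int) : Int :=
  let mask : Int := 0x5555555555555555
  PySem.Int.bor (PySem.Int.band (num >>> (1 : Nat)) mask)
    ((PySem.Int.band num mask) <<< (1 : Nat))

-- ===== PRECONDITION & SPEC =====
-- Pre_ excludes negative inputs: on them Python A's while loop never terminates (num//4 stabilises at -1).
def Pre_swap_bits (num : Int) : Prop := 0 ≤ num
instance (num : Int) : Decidable (Pre_swap_bits num) := by unfold Pre_swap_bits; infer_instance
def pvWitness_swap_bits : Int := 6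

def Spec_swap_bits (num : Int) (out : Int) : Prop := out = swap_bits_alt num
instance (num : Int) (out : Int) : Decidable (Spec_swap_bits num out) := by unfold Spec_swap_bits; infer_instance

-- ===== CLAIM (what is proved, stated in full; the proofs are below) =====
def Claim_equal_swap_bits : Prop := ∀ (num : Int), Dom_swap_bits num → Pre_swap_bits num → Spec_swap_bits num (swap_bits num)

-- ===== LEMMAS AND PROOFS =====

-- Pure Nat model of A's digit recursion.
def pvSw (d : Nat) : Nat :=
  match d with
  | 0 => 0
  | 1 => 2
  | 2 => 1
  | _ => 3

def pvS (n : Nat) : Nat :=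
  if h : n = 0 then 0
  else pvSw (n % 4) + 4 * pvS (n / 4)
decreasing_by exact Nat.div_lt_self (Nat.pos_of_ne_zero h) (by omega)

-- position i after swapping adjacent pairs
def pvBp (i : Nat) : Nat := if i % 2 = 0 then i + 1 else i - 1

def pvMaskN : Nat := 0x5555555555555555

-- Nat model of B's transform.
def pvG (n : Nat) : Nat := ((n >>> 1) &&& pvMaskN) ||| ((n &&& pvMaskN) <<< 1)

lemma pvSwapLoop_inv (n : Nat) : ∀ sol p : Int,
    pvSwapLoop (n : Int) sol p = sol + p * (pvS n : Int) := by
  induction n using Nat.strong_induction_on with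
  | _ n ih =>
    intro sol p
    by_cases h0 : n = 0
    · subst h0
      rw [pvSwapLoop, pvS]
      simp
    · rw [pvSwapLoop]
      have hpos : ¬ ((n : Int) ≤ 0) := by omega
      rw [if_neg hpos]
      have hmod : PySem.Int.mod (n : Int) 4 = ((n % 4 : Nat) : Int) := by
        exact_mod_cast PySem.Int.mod_natCast n 4
      have hdiv : PySem.Int.floordiv (n : Int) 4 = ((n / 4 : Nat) : Int) := by
        exact_mod_cast PySem.Int.floordiv_natCast n 4
      have htab : (PySem.List.pyGet? pvSwapTable ((n % 4 : Nat) : Int)).getD 0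
          = (pvSw (n % 4) : Int) := by
        have h4 : n % 4 < 4 := Nat.mod_lt _ (by omega)
        interval_cases h : (n % 4) <;> decide
      rw [hmod, hdiv, htab, ih (n / 4) (Nat.div_lt_self (Nat.pos_of_ne_zero h0) (by omega))]
      have hS : pvS n = pvSw (n % 4) + 4 * pvS (n / 4) := by rw [pvS, dif_neg h0]
      rw [hS]
      push_cast
      rw [Int.shiftLeft_eq]
      ring

lemma swap_bits_eq_pvS (num : Int) (h : 0 ≤ num) :
    swap_bits num = (pvS num.toNat : Int) := by
  have hinv := pvSwapLoop_inv num.toNat 0 1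
  rw [show ((num.toNat : Nat) : Int) = num by omega] at hinv
  rw [swap_bits, hinv]
  ring

lemma pvS_testBit (n : Nat) : ∀ i : Nat, (pvS n).testBit i = n.testBit (pvBp i) := by
  induction n using Nat.strong_induction_on with
  | _ n ih =>
    intro i
    by_cases h0 : n = 0
    · subst h0; rw [pvS]; simp
    · rw [pvS, dif_neg h0]
      have hswlt : pvSw (n % 4) < 4 := by
        have : n % 4 < 4 := Nat.mod_lt _ (by omega)
        interval_cases h : (n % 4) <;> decide
      -- decompose both sides at bit i via %4 , /4
      have decompL : ∀ (a b j : Nat), a < 4 →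
          (a + 4 * b).testBit j = if j < 2 then a.testBit j else b.testBit (j - 2) := by
        intro a b j ha
        have hmod : (a + 4 * b) % 4 = a := by omega
        have hdiv : (a + 4 * b) / 4 = b := by omega
        by_cases hj : j < 2
        · have := Nat.testBit_mod_two_pow (a + 4 * b) 2 j
          rw [if_pos hj]
          simpa [hj, hmod] using this.symm
        · rw [if_neg hj]
          have := Nat.testBit_div_two_pow (n := 2) (a + 4 * b) (j - 2)
          rw [show (2:Nat)^2 = 4 by norm_num, hdiv] at this
          rw [this]
          congr 1
          omega
      rw [decompL _ _ _ hswlt]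
      have decompR : n.testBit (pvBp i)
          = if pvBp i < 2 then (n % 4).testBit (pvBp i) else (n / 4).testBit (pvBp i - 2) := by
        have hn : n = n % 4 + 4 * (n / 4) := by omega
        conv_lhs => rw [hn]
        exact decompL _ _ _ (Nat.mod_lt _ (by omega))
      rw [decompR]
      by_cases hi : i < 2
      · have hbp : pvBp i < 2 := by unfold pvBp; split <;> omega
        rw [if_pos hi, if_pos hbp]
        have h4 : n % 4 < 4 := Nat.mod_lt _ (by omega)
        interval_cases h : (n % 4) <;> interval_cases i <;> decide
      · have hbp : ¬ pvBp i < 2 := by unfold pvBp; split <;> omega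
        rw [if_neg hi, if_neg hbp]
        rw [ih (n / 4) (Nat.div_lt_self (Nat.pos_of_ne_zero h0) (by omega)) (i - 2)]
        congr 1
        unfold pvBp
        split <;> split <;> omega

lemma pvMaskN_testBit (i : Nat) :
    pvMaskN.testBit i = (decide (i % 2 = 0) && decide (i < 64)) := by
  by_cases h : i < 64
  · interval_cases i <;> decide
  · have : pvMaskN < 2 ^ i := by
      calc pvMaskN < 2 ^ 64 := by decide
        _ ≤ 2 ^ i := Nat.pow_le_pow_right (by omega) (by omega)
    rw [Nat.testBit_lt_two_pow this]
    simp [h]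

lemma pvG_testBit (n : Nat) (hn : n < 2 ^ 32) (i : Nat) :
    (pvG n).testBit i = n.testBit (pvBp i) := by
  have hhigh : ∀ j : Nat, 32 ≤ j → n.testBit j = false := by
    intro j hj
    exact Nat.testBit_lt_two_pow (lt_of_lt_of_le hn (Nat.pow_le_pow_right (by omega) hj))
  simp only [pvG, Nat.testBit_or, Nat.testBit_and, Nat.testBit_shiftRight,
    Nat.testBit_shiftLeft, pvMaskN_testBit]
  rw [Nat.add_comm 1 i]
  by_cases hpar : i % 2 = 0
  · -- even position: result bit i = n bit (i+1)
    have hbp : pvBp i = i + 1 := by unfold pvBp; simp [hpar]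
    rw [hbp]
    by_cases hlt : i < 64
    · have h1 : ¬ ((i - 1) % 2 = 0) ∨ i = 0 := by omega
      rcases h1 with h1 | h1
      · simp [hpar, hlt, h1]
      · subst h1; simp
    · have : n.testBit (i + 1) = false := hhigh _ (by omega)
      have h2 : n.testBit (i - 1) = false := hhigh _ (by omega)
      simp [hlt, this, h2]
  · -- odd position: result bit i = n bit (i-1)
    have hbp : pvBp i = i - 1 := by unfold pvBp; simp [hpar]
    rw [hbp]
    have h1 : (i - 1) % 2 = 0 := by omega
    have hge : 1 ≤ i := by omega
    by_cases hlt : i - 1 < 64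
    · simp [hpar, h1, hlt, hge]
    · have h2 : n.testBit (i - 1) = false := hhigh _ (by omega)
      simp [hpar, h1, hlt, h2]

lemma pvS_eq_pvG (n : Nat) (hn : n < 2 ^ 32) : pvS n = pvG n := by
  apply Nat.eq_of_testBit_eq
  intro i
  rw [pvS_testBit, pvG_testBit n hn]

lemma swap_bits_alt_eq_pvG (n : Nat) : swap_bits_alt (n : Int) = (pvG n : Int) := by
  rw [swap_bits_alt, pvG]
  have hmask : (0x5555555555555555 : Int) = ((pvMaskN : Nat) : Int) := by
    rw [pvMaskN]; norm_num
  rw [hmask,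
    show ((n : Int) >>> (1 : Nat)) = ((n >>> 1 : Nat) : Int) from (Int.natCast_shiftRight n 1).symm,
    PySem.Int.band_natCast, PySem.Int.band_natCast,
    show (((n &&& pvMaskN : Nat) : Int) <<< (1 : Nat)) = (((n &&& pvMaskN) <<< 1 : Nat) : Int) from
      (Int.natCast_shiftLeft _ 1).symm,
    PySem.Int.bor_natCast]

-- ===== VERDICT (by name: the statement is the Claim_ definition above) =====
theorem swap_bits_spec : Claim_equal_swap_bits := by
  intro num hdom hpre
  unfold Spec_swap_bits
  have hn : num = ((num.toNat : Nat) : Int) := by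
    unfold Pre_swap_bits at hpre; omega
  have hbound : num.toNat < 2 ^ 32 := by
    unfold Dom_swap_bits pvDomInt at hdom
    simp only [decide_eq_true_eq] at hdom
    omega
  calc swap_bits num = (pvS num.toNat : Int) :=
        swap_bits_eq_pvS num (by unfold Pre_swap_bits at hpre; exact hpre)
    _ = (pvG num.toNat : Int) := by rw [pvS_eq_pvG _ hbound]
    _ = swap_bits_alt ((num.toNat : Nat) : Int) := (swap_bits_alt_eq_pvG _).symm
    _ = swap_bits_alt num := by rw [← hn]
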